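-- pv_equiv track=rewrite | github.com/ALOHAALOHAALOJHA/FARFAN_MCDPP | audit_evidence_flow_wiring.py | _is_source_valid
-- ===== SOURCE A (Python) =====
-- from typing import Any, Dict, List, Set, Tuple
--
-- def _is_source_valid(source: str, method_outputs: Set[str]) -> bool:
--     """Check if assembly source references a valid method output."""
--     # Sources can be direct method outputs or nested paths
--     # e.g., "text_mining.diagnose_critical_links" or just "primary_analysis"
--
--     # Check direct match
--     if source in method_outputs:
--         return True
--
--     # Check if source starts with any method output (nested path)
--     for output in method_outputs:
--         if source.startswith(output + "."):
--             return True
--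
--     # Check for common base paths that methods use
--     base_paths = source.split(".")[0] if "." in source else source
--     if base_paths in method_outputs:
--         return True
--
--     return False
-- ===== SOURCE B (Python) =====
-- def _is_source_valid(source: str, method_outputs) -> bool:
--     """Check if assembly source references a valid method output.
--
--     Instead of scanning every method output for an "output." prefix match,
--     hop between the '.' positions of source with str.find and test each
--     dot-boundary prefix (and source itself) for set membership.
--     """
--     if source in method_outputs:
--         return True
--     i = source.find('.')
--     while i != -1:
--         if source[:i] in method_outputs:
--             return True
--         i = source.find('.', i + 1)
--     return False
-- ===== Notes on version B (the rewrite author's own statement) =====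
-- stated objective: faster
-- what changed: B replaces A's scan over all method outputs (testing each for an 'output.' prefix of source, plus a redundant first-segment re-check) by hopping between the '.' positions of source with str.find and testing each dot-boundary prefix (and source itself) for set membership.
import Mathlib
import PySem

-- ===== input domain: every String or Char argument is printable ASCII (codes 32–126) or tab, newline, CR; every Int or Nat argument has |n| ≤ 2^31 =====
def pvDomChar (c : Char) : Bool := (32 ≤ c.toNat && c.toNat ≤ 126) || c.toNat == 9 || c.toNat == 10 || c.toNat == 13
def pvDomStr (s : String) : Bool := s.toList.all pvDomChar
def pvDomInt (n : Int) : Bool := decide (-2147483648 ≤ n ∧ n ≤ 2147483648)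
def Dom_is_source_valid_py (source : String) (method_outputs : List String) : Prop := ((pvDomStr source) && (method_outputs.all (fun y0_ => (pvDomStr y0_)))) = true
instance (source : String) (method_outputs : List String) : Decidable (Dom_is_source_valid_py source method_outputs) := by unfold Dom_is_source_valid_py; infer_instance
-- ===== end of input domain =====

-- B walks source once testing each dot-boundary prefix for membership, instead of
-- scanning every method output for an "output." prefix of source (objective: faster).


-- ===== PORT A =====
-- transliteration of _is_source_valid over List Char; `source.split(".")[0]` is
-- `(splitOn …).headD []` (split always returns a nonempty list, so [0] is its head)
def is_source_valid_py (source : String) (method_outputs : List String) : Bool :=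
  let cs := source.toList
  let outs := method_outputs.map String.toList
  if outs.contains cs then true
  else if outs.any (fun o => PySem.Chars.startswith cs (o ++ ['.'])) then true
  else
    let base := if PySem.Chars.isIn ['.'] cs then (PySem.Chars.splitOn cs ['.']).headD [] else cs
    if outs.contains base then true
    else false

-- ===== PORT B =====
-- B's while-loop as structural recursion on fuel; `source[:i]` is `slice … (some i)`.
-- fuel = cs.length + 1 is enough: each find result strictly increases (proved below).
def isvAltLoop (outs : List (List Char)) (cs : List Char) : Nat → Int → Bool
  | 0, _ => false
  | fuel + 1, i =>
    if i = -1 then false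
    else if outs.contains (PySem.List.slice cs none (some i)) then true
    else isvAltLoop outs cs fuel (PySem.Chars.findFrom cs ['.'] (i + 1) none)

def is_source_valid_py_alt (source : String) (method_outputs : List String) : Bool :=
  let outs := method_outputs.map String.toList
  if outs.contains source.toList then true
  else isvAltLoop outs source.toList (source.toList.length + 1)
    (PySem.Chars.find source.toList ['.'])

-- ===== PRECONDITION & SPEC =====
def Spec_is_source_valid_py (source : String) (method_outputs : List String) (out : Bool) : Prop := out = is_source_valid_py_alt source method_outputs
instance (source : String) (method_outputs : List String) (out : Bool) : Decidable (Spec_is_source_valid_py source method_outputs out) := by unfold Spec_is_source_valid_py; infer_instance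

-- ===== CLAIM (what is proved, stated in full; the proofs are below) =====
def Claim_equal_is_source_valid_py : Prop := ∀ (source : String) (method_outputs : List String), Dom_is_source_valid_py source method_outputs → Spec_is_source_valid_py source method_outputs (is_source_valid_py source method_outputs)

-- ===== LEMMAS AND PROOFS =====

-- the common characterisation: some dot-boundary prefix (or the whole string) is an output
def isvHit (outs : List (List Char)) (cs : List Char) : Prop :=
  cs ∈ outs ∨ ∃ u v, cs = u ++ '.' :: v ∧ u ∈ outs

-- B's loop, started at the first '.' at or after position k with enough fuel, finds
-- exactly the dot-boundary prefixes of cs of length ≥ k that are outputs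
theorem isvAltLoop_find_iff (outs : List (List Char)) (cs : List Char) :
    ∀ (fuel k : Nat), k ≤ cs.length → cs.length - k < fuel →
    (isvAltLoop outs cs fuel (PySem.Chars.findFrom cs ['.'] (k : Int) none) = true ↔
      ∃ n, k ≤ n ∧ ['.'] <+: cs.drop n ∧ cs.take n ∈ outs) := by
  intro fuel
  induction fuel with
  | zero => intro k _ h; omega
  | succ fuel ih =>
    intro k hk _
    by_cases hj : PySem.Chars.findFrom cs ['.'] (k : Int) none = -1
    · have hfalse : isvAltLoop outs cs (fuel + 1) (-1) = false := by simp [isvAltLoop]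
      rw [hj, hfalse]
      simp only [Bool.false_eq_true, false_iff]
      rintro ⟨n, hn, hp, -⟩
      have hnotin := (PySem.Chars.findFrom_natCast_eq_neg_one_iff cs ['.'] k hk).mp hj
      refine hnotin ?_
      have hsub : cs.drop n <:+ cs.drop k := by
        have hdd : cs.drop n = (cs.drop k).drop (n - k) := by
          rw [List.drop_drop]; congr 1; omega
        rw [hdd]
        exact List.drop_suffix _ _
      exact hp.isInfix.trans hsub.isInfix
    · obtain ⟨hge, hpref, hmin⟩ := PySem.Chars.findFrom_natCast_spec cs ['.'] k hk hj
      set j := PySem.Chars.findFrom cs ['.'] (k : Int) none with hjdef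
      have hj0 : 0 ≤ j := le_trans (by exact_mod_cast Nat.zero_le k) hge
      have hjlt : j.toNat < cs.length := by
        by_contra hge'
        rw [List.drop_eq_nil_of_le (by omega)] at hpref
        simp at hpref
      simp only [isvAltLoop, if_neg hj]
      rw [PySem.List.slice_to cs hj0]
      by_cases hc : outs.contains (cs.take j.toNat) = true
      · rw [if_pos hc]
        exact iff_of_true rfl ⟨j.toNat, by omega, hpref, List.contains_iff_mem.mp hc⟩
      · rw [if_neg hc]
        rw [show j + 1 = ((j.toNat + 1 : Nat) : Int) by omega]
        rw [ih (j.toNat + 1) (by omega) (by omega)]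
        constructor
        · rintro ⟨n, hn, hp, hm⟩
          exact ⟨n, by omega, hp, hm⟩
        · rintro ⟨n, hn, hp, hm⟩
          refine ⟨n, ?_, hp, hm⟩
          rcases Nat.lt_or_ge n (j.toNat + 1) with h | h
          · rcases Nat.lt_or_ge n j.toNat with h' | h'
            · exact absurd hp (hmin n hn h')
            · have : n = j.toNat := by omega
              subst this
              exact absurd (List.contains_iff_mem.mpr hm) hc
          · exact h

-- splitOn.go prepends its accumulator (reversed) to the empty-accumulator run
theorem isv_go_append (fuel : Nat) : ∀ (l cur : List Char) (acc : List (List Char)),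
    PySem.Chars.splitOn.go ['.'] fuel l cur acc
      = acc.reverse ++ PySem.Chars.splitOn.go ['.'] fuel l cur [] := by
  induction fuel with
  | zero => intro l cur acc; simp [PySem.Chars.splitOn.go]
  | succ f ih =>
    intro l cur acc
    cases l with
    | nil => simp [PySem.Chars.splitOn.go]
    | cons c rest =>
      simp only [PySem.Chars.splitOn.go]
      by_cases h : ['.'].isPrefixOf (c :: rest) = true
      · simp only [h, if_true]
        rw [ih _ _ (cur.reverse :: acc), ih _ _ [cur.reverse]]
        simp
      · simp only [h, Bool.false_eq_true, if_false]
        exact ih rest (c :: cur) acc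

-- head of splitOn.go (empty accumulator) is the input up to the first '.'
theorem isv_go_head (fuel : Nat) : ∀ (l cur : List Char), l.length ≤ fuel →
    ∃ t, PySem.Chars.splitOn.go ['.'] fuel l cur []
      = (cur.reverse ++ l.takeWhile (fun c => !(c == '.'))) :: t := by
  induction fuel with
  | zero =>
    intro l cur h
    rw [List.length_eq_zero_iff.mp (Nat.le_zero.mp h)]
    exact ⟨[], by simp [PySem.Chars.splitOn.go]⟩
  | succ f ih =>
    intro l cur h
    cases l with
    | nil => exact ⟨[], by simp [PySem.Chars.splitOn.go]⟩
    | cons c rest =>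
      by_cases hc : c = '.'
      · subst hc
        refine ⟨PySem.Chars.splitOn.go ['.'] f rest [] [], ?_⟩
        simp only [PySem.Chars.splitOn.go, List.isPrefixOf, beq_self_eq_true, Bool.true_and,
          if_true]
        rw [isv_go_append]
        simp [List.takeWhile]
      · have hle : rest.length ≤ f := by simpa using h
        obtain ⟨t, ht⟩ := ih rest (c :: cur) hle
        refine ⟨t, ?_⟩
        have hbc : (c == '.') = false := beq_eq_false_iff_ne.mpr hc
        have hpre : (['.'].isPrefixOf (c :: rest)) = false := by
          simp [List.isPrefixOf, Ne.symm hc]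
        simp only [PySem.Chars.splitOn.go, hpre, Bool.false_eq_true, if_false]
        rw [ht, List.takeWhile_cons]
        simp [hbc]

theorem isv_splitOn_head (cs : List Char) :
    (PySem.Chars.splitOn cs ['.']).headD [] = cs.takeWhile (fun c => !(c == '.')) := by
  obtain ⟨t, ht⟩ := isv_go_head (cs.length + 1) cs [] (Nat.le_succ _)
  simp [PySem.Chars.splitOn, ht]

-- the decomposition of cs at its first dot
theorem isv_first_dot (cs : List Char) (h : '.' ∈ cs) :
    ∃ v, cs = cs.takeWhile (fun c => !(c == '.')) ++ '.' :: v := by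
  have hne : cs.dropWhile (fun c => !(c == '.')) ≠ [] := by
    intro he
    have := (List.dropWhile_eq_nil_iff).mp he _ h
    simp at this
  obtain ⟨d, tl, hdt⟩ := List.exists_cons_of_ne_nil hne
  have hd : d = '.' := by
    have := List.head_dropWhile_not (fun c => !(c == '.')) hne
    simp only [hdt, List.head_cons] at this
    simpa using this
  refine ⟨tl, ?_⟩
  conv_lhs => rw [← List.takeWhile_append_dropWhile (p := fun c => !(c == '.')) (l := cs)]
  rw [hdt, hd]

theorem isvA_iff (source : String) (methods : List String) :
    (is_source_valid_py source methods = true ↔ isvHit (methods.map String.toList) source.toList) := by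
  set cs := source.toList with hcs
  set outs := methods.map String.toList with houts
  simp only [is_source_valid_py, ← hcs, ← houts]
  split_ifs with h1 h2 hd hb
  · exact iff_of_true rfl (Or.inl (List.contains_iff_mem.mp h1))
  · refine iff_of_true rfl ?_
    obtain ⟨o, ho, hsw⟩ := List.any_eq_true.mp h2
    obtain ⟨v, hv⟩ := (PySem.Chars.startswith_iff _ _).mp hsw
    exact Or.inr ⟨o, v, by rw [← hv, List.append_assoc]; rfl, ho⟩
  · refine iff_of_true rfl ?_
    rw [isv_splitOn_head] at hb
    have hmem : '.' ∈ cs := by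
      obtain ⟨u, v, hv⟩ := (PySem.Chars.isIn_iff_infix _ _).mp hd
      rw [← hv]; simp
    obtain ⟨v, hv⟩ := isv_first_dot cs hmem
    exact Or.inr ⟨_, v, hv, List.contains_iff_mem.mp hb⟩
  · refine iff_of_false (by simp) ?_
    rintro (hm | ⟨u, v, hv, hm⟩)
    · exact h1 (List.contains_iff_mem.mpr hm)
    · exact h2 (List.any_eq_true.mpr ⟨u, hm,
        (PySem.Chars.startswith_iff _ _).mpr ⟨v, by rw [hv, List.append_assoc]; rfl⟩⟩)
  · refine iff_of_false (by simp) ?_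
    rintro (hm | ⟨u, v, hv, hm⟩)
    · exact h1 (List.contains_iff_mem.mpr hm)
    · exact h2 (List.any_eq_true.mpr ⟨u, hm,
        (PySem.Chars.startswith_iff _ _).mpr ⟨v, by rw [hv, List.append_assoc]; rfl⟩⟩)

theorem isvB_iff (source : String) (methods : List String) :
    (is_source_valid_py_alt source methods = true ↔ isvHit (methods.map String.toList) source.toList) := by
  set cs := source.toList with hcs
  set outs := methods.map String.toList with houts
  simp only [is_source_valid_py_alt, ← hcs, ← houts]
  split_ifs with h1
  · exact iff_of_true rfl (Or.inl (List.contains_iff_mem.mp h1))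
  · rw [← PySem.Chars.findFrom_zero cs ['.'], show (0 : Int) = ((0 : Nat) : Int) by rfl,
      isvAltLoop_find_iff outs cs (cs.length + 1) 0 (Nat.zero_le _) (by omega)]
    constructor
    · rintro ⟨n, -, hp, hm⟩
      obtain ⟨v, hv⟩ := hp
      refine Or.inr ⟨cs.take n, v, ?_, hm⟩
      conv_lhs => rw [← List.take_append_drop n cs]
      rw [← hv]
      simp
    · rintro (hm | ⟨u, v, hv, hm⟩)
      · exact absurd (List.contains_iff_mem.mpr hm) h1
      · refine ⟨u.length, Nat.zero_le _, ?_, ?_⟩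
        · rw [hv, List.drop_left]
          exact ⟨v, rfl⟩
        · rw [hv, List.take_left]
          exact hm

-- ===== VERDICT (by name: the statement is the Claim_ definition above) =====
theorem is_source_valid_py_spec : Claim_equal_is_source_valid_py := by
  intro source methods _
  unfold Spec_is_source_valid_py
  rw [Bool.eq_iff_iff, isvA_iff source methods, isvB_iff source methods]
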